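-- pv_equiv track=rewrite | github.com/ZebraAlgebra/AlgebraCourseWebsite | workspace/utils/generate_md.py | replace_dollars_underlines
-- ===== SOURCE A (Python) =====
-- def replace_dollars_underlines(old):
--     '''
--     Replaces dollar signs and underlines by mdbook renderable syntax
--     '''
--     # replace underlines
--     old = old.replace("_", "\\_")
--     # replace displaystyle $$'s
--     d = {(True, "$"): "\\\\(", (False, "$"): "\\\\)",
--          (True, "$$"): "\\\\[", (False, "$$"): "\\\\]",}
--     for c in  ["$$", "$"]:
--         old_displaystyle_split = old.split(c)
--         parity = True
--         for i in range(0, len(old_displaystyle_split) - 1):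
--             old_displaystyle_split[i] += d[(parity, c)]
--             parity = not parity
--         old = "".join(old_displaystyle_split)
--     return old
-- ===== SOURCE B (Python) =====
-- def replace_dollars_underlines(old):
--     '''
--     Replaces dollar signs and underlines by mdbook renderable syntax
--     '''
--     out = []
--     disp = True
--     inl = True
--     i = 0
--     n = len(old)
--     while i < n:
--         c = old[i]
--         if c == "$" and i + 1 < n and old[i + 1] == "$":
--             out.append("\\\\[" if disp else "\\\\]")
--             disp = not disp
--             i += 2
--         elif c == "$":
--             out.append("\\\\(" if inl else "\\\\)")
--             inl = not inl
--             i += 1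
--         elif c == "_":
--             out.append("\\_")
--             i += 1
--         else:
--             out.append(c)
--             i += 1
--     return "".join(out)
-- ===== Notes on version B (the rewrite author's own statement) =====
-- stated objective: alternative
-- what changed: A's replace() pass plus two sequential split/index-loop/join passes (double-dollar delimiters, then single ones) are replaced by a single left-to-right scan with two independent parity flags that consumes a double-dollar delimiter greedily before a single one and escapes underscores inline.
import Mathlib
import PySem

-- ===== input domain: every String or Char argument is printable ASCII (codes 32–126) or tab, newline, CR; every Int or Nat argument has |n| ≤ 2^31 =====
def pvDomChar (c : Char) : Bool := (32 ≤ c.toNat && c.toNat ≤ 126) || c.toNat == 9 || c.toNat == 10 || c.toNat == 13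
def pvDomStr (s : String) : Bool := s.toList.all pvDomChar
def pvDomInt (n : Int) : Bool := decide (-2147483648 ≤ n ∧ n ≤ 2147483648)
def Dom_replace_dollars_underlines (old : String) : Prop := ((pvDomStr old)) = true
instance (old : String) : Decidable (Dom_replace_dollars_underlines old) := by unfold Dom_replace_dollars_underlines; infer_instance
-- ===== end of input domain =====

-- B replaces A's replace() pass plus two split/modify/join passes by one left-to-right
-- scan with two independent parity flags (objective: alternative single-pass decomposition).

-- ===== PORT A =====
-- the dict d of A (keys (parity, separator), values the replacements), at List Char level
def pvDictA : PySem.Dict (Bool × List Char) (List Char) :=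
  PySem.Dict.ofList
    [((true, ['$']), ['\\','\\','(']), ((false, ['$']), ['\\','\\',')']),
     ((true, ['$','$']), ['\\','\\','[']), ((false, ['$','$']), ['\\','\\',']'])]

def replace_dollars_underlines (old : String) : String :=
  -- old = old.replace("_", "\\_")
  let o1 : List Char := PySem.Chars.replace old.toList ['_'] ['\\','_']
  -- for c in ["$$", "$"]: split on c, append d[(parity, c)] to all pieces but the last, join
  let res : List Char :=
    [['$','$'], ['$']].foldl (fun cur c =>
      let pieces := PySem.Chars.splitOn cur c
      let st :=
        (PySem.List.pyRange 0 ((pieces.length : Int) - 1) 1).foldl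
          (fun (st : List (List Char) × Bool) i =>
            (st.1.set i.toNat (PySem.List.pyGetD st.1 i [] ++ PySem.Dict.getD pvDictA (st.2, c) []),
             !st.2))
          (pieces, true)
      PySem.Chars.join [] st.1) o1
  String.ofList res

-- ===== PORT B =====
-- the while loop of Source B: the index scan over the string becomes a scan over the char
-- list; out is the list of appended strings (as char lists), joined at the end
def bGo : Bool → Bool → List Char → List (List Char) → List (List Char)
  | disp, inl, '$' :: '$' :: t, out =>
      bGo (!disp) inl t (out ++ [if disp then ['\\','\\','['] else ['\\','\\',']']])
  | disp, inl, '$' :: t, out =>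
      bGo disp (!inl) t (out ++ [if inl then ['\\','\\','('] else ['\\','\\',')']])
  | disp, inl, '_' :: t, out => bGo disp inl t (out ++ [['\\','_']])
  | disp, inl, c :: t, out => bGo disp inl t (out ++ [[c]])
  | _, _, [], out => out

def replace_dollars_underlines_alt (old : String) : String :=
  String.ofList (PySem.Chars.join [] (bGo true true old.toList []))

-- ===== PRECONDITION & SPEC =====
def Spec_replace_dollars_underlines (old : String) (out : String) : Prop := out = replace_dollars_underlines_alt old
instance (old : String) (out : String) : Decidable (Spec_replace_dollars_underlines old out) := by unfold Spec_replace_dollars_underlines; infer_instance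

-- ===== CLAIM (what is proved, stated in full; the proofs are below) =====
def Claim_equal_replace_dollars_underlines : Prop := ∀ (old : String), Dom_replace_dollars_underlines old → Spec_replace_dollars_underlines old (replace_dollars_underlines old)

-- ===== LEMMAS AND PROOFS =====

def repl : List Char → List Char
  | [] => []
  | '_' :: t => '\\' :: '_' :: repl t
  | c :: t => c :: repl t

theorem repl_cons_ne (c : Char) (t : List Char) (hc : c ≠ '_') : repl (c :: t) = c :: repl t := by
  rw [repl.eq_def]; split <;> simp_all

theorem replace_go_eq (fuel : Nat) (l acc : List Char) (h : l.length ≤ fuel) :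
    PySem.Chars.replace.go ['_'] ['\\','_'] fuel l acc = acc.reverse ++ repl l := by
  induction fuel generalizing l acc with
  | zero =>
      have : l = [] := by cases l <;> simp_all
      subst this
      simp [PySem.Chars.replace.go, repl]
  | succ f ih =>
      cases l with
      | nil => simp [PySem.Chars.replace.go, repl]
      | cons c t =>
          rw [PySem.Chars.replace.go]
          by_cases hc : c = '_'
          · subst hc
            have hp : (['_'] : List Char).isPrefixOf ('_' :: t) = true := by
              simp [List.isPrefixOf]
            rw [if_pos hp]
            rw [ih _ _ (by simpa using Nat.le_of_succ_le_succ h)]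
            simp [repl]
          · have hp : ¬ ((['_'] : List Char).isPrefixOf (c :: t) = true) := by
              simp [List.isPrefixOf]; exact fun hh => hc hh.symm
            rw [if_neg hp]
            rw [ih _ _ (by simpa using Nat.le_of_succ_le_succ h)]
            rw [repl_cons_ne c t hc]
            simp

theorem replace_eq_repl (cs : List Char) :
    PySem.Chars.replace cs ['_'] ['\\','_'] = repl cs := by
  rw [PySem.Chars.replace]
  simp only [List.isEmpty]
  · exact replace_go_eq cs.length cs [] (le_refl _) |>.trans (by simp)

def splits2 : List Char → List (List Char)
  | [] => [[]]
  | '$' :: '$' :: t => [] :: splits2 t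
  | c :: t => (c :: (splits2 t).headI) :: (splits2 t).tail

theorem splits2_ne (c : Char) (t : List Char) (h : ¬(c = '$' ∧ t.head? = some '$')) :
    splits2 (c :: t) = (c :: (splits2 t).headI) :: (splits2 t).tail := by
  rw [splits2.eq_def]; split <;> simp_all

theorem splits2_nonempty (l : List Char) : splits2 l ≠ [] := by
  rw [splits2.eq_def]; split <;> simp

theorem splitOn_go2 (fuel : Nat) (l cur : List Char) (acc : List (List Char))
    (h : l.length < fuel) :
    PySem.Chars.splitOn.go ['$','$'] fuel l cur acc
      = acc.reverse ++ (cur.reverse ++ (splits2 l).headI) :: (splits2 l).tail := by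
  induction fuel generalizing l cur acc with
  | zero => omega
  | succ f ih =>
      cases l with
      | nil => simp [PySem.Chars.splitOn.go, splits2]
      | cons c t =>
          rw [PySem.Chars.splitOn.go]
          by_cases hp : (['$','$'] : List Char).isPrefixOf (c :: t) = true
          · obtain ⟨rfl, t', rfl⟩ : c = '$' ∧ ∃ t', t = '$' :: t' := by
              have hp' := hp
              cases t with
              | nil => simp [List.isPrefixOf] at hp'
              | cons d r =>
                  simp [List.isPrefixOf] at hp'
                  exact ⟨hp'.1.symm, r, by rw [← hp'.2]⟩
            rw [if_pos hp]
            rw [ih _ _ _ (by simp at h ⊢; omega)]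
            have : splits2 ('$' :: '$' :: t') = [] :: splits2 t' := by rw [splits2]
            rw [this]
            rcases hne : splits2 t' with _ | ⟨x, xs⟩
            · exact absurd hne (splits2_nonempty t')
            · simp [hne]
          · rw [if_neg hp]
            rw [ih _ _ _ (by simp at h ⊢; omega)]
            have hn : ¬(c = '$' ∧ t.head? = some '$') := by
              rintro ⟨rfl, hh⟩
              cases t with
              | nil => simp at hh
              | cons d r => simp at hh; subst hh; simp [List.isPrefixOf] at hp
            rw [splits2_ne c t hn]
            rcases hne : splits2 t with _ | ⟨x, xs⟩
            · exact absurd hne (splits2_nonempty t)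
            · simp

theorem splitOn2_eq (cs : List Char) : PySem.Chars.splitOn cs ['$','$'] = splits2 cs := by
  rw [PySem.Chars.splitOn]
  rw [splitOn_go2 _ _ _ _ (by omega)]
  rcases hne : splits2 cs with _ | ⟨x, xs⟩
  · exact absurd hne (splits2_nonempty cs)
  · simp

def splits1 : List Char → List (List Char)
  | [] => [[]]
  | '$' :: t => [] :: splits1 t
  | c :: t => (c :: (splits1 t).headI) :: (splits1 t).tail

theorem splits1_ne (c : Char) (t : List Char) (h : c ≠ '$') :
    splits1 (c :: t) = (c :: (splits1 t).headI) :: (splits1 t).tail := by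
  rw [splits1.eq_def]; split <;> simp_all

theorem splits1_nonempty (l : List Char) : splits1 l ≠ [] := by
  rw [splits1.eq_def]; split <;> simp

theorem splitOn_go1 (fuel : Nat) (l cur : List Char) (acc : List (List Char))
    (h : l.length < fuel) :
    PySem.Chars.splitOn.go ['$'] fuel l cur acc
      = acc.reverse ++ (cur.reverse ++ (splits1 l).headI) :: (splits1 l).tail := by
  induction fuel generalizing l cur acc with
  | zero => omega
  | succ f ih =>
      cases l with
      | nil => simp [PySem.Chars.splitOn.go, splits1]
      | cons c t =>
          rw [PySem.Chars.splitOn.go]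
          by_cases hp : (['$'] : List Char).isPrefixOf (c :: t) = true
          · obtain rfl : c = '$' := by simp [List.isPrefixOf] at hp; exact hp.symm
            rw [if_pos hp]
            rw [ih _ _ _ (by simp at h ⊢; omega)]
            have : splits1 ('$' :: t) = [] :: splits1 t := by rw [splits1]
            rw [this]
            rcases hne : splits1 t with _ | ⟨x, xs⟩
            · exact absurd hne (splits1_nonempty t)
            · simp [hne]
          · rw [if_neg hp]
            rw [ih _ _ _ (by simp at h ⊢; omega)]
            have hc : c ≠ '$' := by
              intro hcc; subst hcc; simp [List.isPrefixOf] at hp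
            rw [splits1_ne c t hc]
            rcases hne : splits1 t with _ | ⟨x, xs⟩
            · exact absurd hne (splits1_nonempty t)
            · simp

theorem splitOn1_eq (cs : List Char) : PySem.Chars.splitOn cs ['$'] = splits1 cs := by
  rw [PySem.Chars.splitOn]
  rw [splitOn_go1 _ _ _ _ (by omega)]
  rcases hne : splits1 cs with _ | ⟨x, xs⟩
  · exact absurd hne (splits1_nonempty cs)
  · simp

def addSeps (f : Bool → List Char) : Bool → List (List Char) → List (List Char)
  | _, [] => []
  | _, [x] => [x]
  | par, x :: y :: r => (x ++ f par) :: addSeps f (!par) (y :: r)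

theorem fold_addSeps (f : Bool → List Char) (pre ps : List (List Char)) (par : Bool) :
    (((PySem.List.pyRange (pre.length : Int) ((pre.length : Int) + (ps.length : Int) - 1) 1).foldl
        (fun (st : List (List Char) × Bool) i =>
          (st.1.set i.toNat (PySem.List.pyGetD st.1 i [] ++ f st.2), !st.2))
        (pre ++ ps, par))).1 = pre ++ addSeps f par ps := by
  induction ps generalizing pre par with
  | nil =>
      have : PySem.List.pyRange (pre.length : Int) ((pre.length : Int) + 0 - 1) 1 = [] := by
        simp [PySem.List.pyRange]
      simp [addSeps]
  | cons p q ih =>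
      cases q with
      | nil =>
          have : PySem.List.pyRange (pre.length : Int) ((pre.length : Int) + 1 - 1) 1 = [] := by
            simp [PySem.List.pyRange]
          simp [addSeps]
      | cons y r =>
          rw [PySem.List.pyRange_one_cons (by simp; omega)]
          rw [List.foldl_cons]
          have hget : PySem.List.pyGetD (pre ++ p :: y :: r) (pre.length : Int) [] = p := by
            rw [PySem.List.pyGetD_eq_getElem _ _ (by positivity) (by simp; omega)]
            simp
          have hset : (pre ++ p :: y :: r).set ((pre.length : Int)).toNat (p ++ f par)
              = pre ++ (p ++ f par) :: y :: r := by
            rw [Int.toNat_natCast, List.set_append]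
            simp
          simp only [hget, hset]
          have hlen : ((pre ++ [p ++ f par]).length : Int) = (pre.length : Int) + 1 := by simp
          have := ih (pre ++ [p ++ f par]) (!par)
          rw [hlen] at this
          have harith : (pre.length : Int) + 1 + ((y :: r).length : Int) - 1
              = (pre.length : Int) + ((p :: y :: r).length : Int) - 1 := by simp; omega
          rw [harith] at this
          rw [List.append_assoc] at this
          simp only [List.singleton_append] at this
          rw [this]
          rw [addSeps]
          simp

def scan2 : Bool → List Char → List Char
  | par, '$' :: '$' :: t => (if par then ['\\','\\','['] else ['\\','\\',']']) ++ scan2 (!par) t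
  | par, c :: t => c :: scan2 par t
  | _, [] => []

def scan1 : Bool → List Char → List Char
  | par, '$' :: t => (if par then ['\\','\\','('] else ['\\','\\',')']) ++ scan1 (!par) t
  | par, c :: t => c :: scan1 par t
  | _, [] => []

theorem scan2_ne (par : Bool) (c : Char) (t : List Char) (h : ¬(c = '$' ∧ t.head? = some '$')) :
    scan2 par (c :: t) = c :: scan2 par t := by
  rw [scan2.eq_def]; split <;> simp_all

theorem scan1_ne (par : Bool) (c : Char) (t : List Char) (h : c ≠ '$') :
    scan1 par (c :: t) = c :: scan1 par t := by
  rw [scan1.eq_def]; split <;> simp_all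

theorem flatten_addSeps2 (par : Bool) (s : List Char) :
    (addSeps (fun p => if p then ['\\','\\','['] else ['\\','\\',']']) par (splits2 s)).flatten
      = scan2 par s := by
  induction s using splits2.induct generalizing par with
  | case1 => simp [splits2, addSeps, scan2]
  | case2 t ih =>
      rw [splits2, scan2]
      rcases hne : splits2 t with _ | ⟨x, xs⟩
      · exact absurd hne (splits2_nonempty t)
      · rw [addSeps]
        simp only [List.flatten_cons]
        rw [← hne, ih]
        simp
  | case3 c t hne1 ih =>
      have hcond : ¬(c = '$' ∧ t.head? = some '$') := by
        rintro ⟨rfl, hh⟩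
        cases t with
        | nil => simp at hh
        | cons d r => simp at hh; exact hne1 r rfl (by rw [hh])
      rw [splits2_ne c t hcond, scan2_ne par c t hcond]
      rcases hne : splits2 t with _ | ⟨x, xs⟩
      · exact absurd hne (splits2_nonempty t)
      · have h2 := ih par
        rw [hne] at h2
        cases xs with
        | nil =>
            simp [addSeps] at h2 ⊢
            exact h2
        | cons z zs =>
            simp [addSeps] at h2 ⊢
            simp [← h2]

theorem flatten_addSeps1 (par : Bool) (s : List Char) :
    (addSeps (fun p => if p then ['\\','\\','('] else ['\\','\\',')']) par (splits1 s)).flatten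
      = scan1 par s := by
  induction s using splits1.induct generalizing par with
  | case1 => simp [splits1, addSeps, scan1]
  | case2 t ih =>
      rw [splits1, scan1]
      rcases hne : splits1 t with _ | ⟨x, xs⟩
      · exact absurd hne (splits1_nonempty t)
      · rw [addSeps]
        simp only [List.flatten_cons]
        rw [← hne, ih]
        simp
  | case3 c t hne1 ih =>
      have hc : c ≠ '$' := hne1
      rw [splits1_ne c t hc, scan1_ne par c t hc]
      rcases hne : splits1 t with _ | ⟨x, xs⟩
      · exact absurd hne (splits1_nonempty t)
      · have h2 := ih par
        rw [hne] at h2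
        cases xs with
        | nil =>
            simp [addSeps] at h2 ⊢
            exact h2
        | cons z zs =>
            simp [addSeps] at h2 ⊢
            simp [← h2]

def scanB : Bool → Bool → List Char → List Char
  | disp, inl, '$' :: '$' :: t => (if disp then ['\\','\\','['] else ['\\','\\',']']) ++ scanB (!disp) inl t
  | disp, inl, '$' :: t => (if inl then ['\\','\\','('] else ['\\','\\',')']) ++ scanB disp (!inl) t
  | disp, inl, '_' :: t => '\\' :: '_' :: scanB disp inl t
  | disp, inl, c :: t => c :: scanB disp inl t
  | _, _, [] => []

theorem scanB_one (disp inl : Bool) (t : List Char) (h : t.head? ≠ some '$') :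
    scanB disp inl ('$' :: t) = (if inl then ['\\','\\','('] else ['\\','\\',')']) ++ scanB disp (!inl) t := by
  rw [scanB.eq_def]; split
  case _ => simp_all
  case _ => simp_all
  case _ => simp_all
  case _ h1 h2 heq => injection heq with e1 e2; exact absurd e1.symm h1
  case _ => simp_all

theorem scanB_other (disp inl : Bool) (c : Char) (t : List Char) (h1 : c ≠ '$') (h2 : c ≠ '_') :
    scanB disp inl (c :: t) = c :: scanB disp inl t := by
  rw [scanB.eq_def]; split <;> simp_all

theorem scan1_append (par : Bool) (xs ys : List Char) (h : '$' ∉ xs) :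
    scan1 par (xs ++ ys) = xs ++ scan1 par ys := by
  induction xs with
  | nil => simp
  | cons c t ih =>
      have hc : c ≠ '$' := fun hh => h (by simp [hh])
      rw [List.cons_append, scan1_ne par c (t ++ ys) hc, ih (fun hh => h (by simp [hh]))]
      rfl

theorem repl_head (t : List Char) : (repl t).head? = some '$' ↔ t.head? = some '$' := by
  rw [repl.eq_def]
  split <;> simp_all

theorem scanB_compose (disp inl : Bool) (s : List Char) :
    scanB disp inl s = scan1 inl (scan2 disp (repl s)) := by
  induction disp, inl, s using scanB.induct with
  | case1 disp inl t ih =>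
      have hr : repl ('$' :: '$' :: t) = '$' :: '$' :: repl t := by
        rw [repl_cons_ne _ _ (by decide), repl_cons_ne _ _ (by decide)]
      rw [scanB, hr, scan2]
      rw [scan1_append _ _ _ (by cases disp <;> decide)]
      rw [ih]
  | case2 disp inl t hne ih =>
      have ht : t.head? ≠ some '$' := by
        intro hh
        cases t with
        | nil => simp at hh
        | cons d r => simp at hh; exact hne r (by rw [hh])
      rw [scanB_one disp inl t ht]
      rw [repl_cons_ne _ _ (by decide)]
      rw [scan2_ne _ _ _ (by rintro ⟨_, hh⟩; exact ht ((repl_head t).mp hh))]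
      rw [scan1]
      rw [ih]
  | case3 disp inl t ih =>
      rw [scanB, repl, scan2_ne _ _ _ (by simp), scan2_ne _ _ _ (by simp), scan1_ne _ _ _ (by simp), scan1_ne _ _ _ (by simp)]
      rw [ih]
  | case4 disp inl c t h1 h2 h3 ih =>
      have hc1 : c ≠ '$' := h2
      have hc2 : c ≠ '_' := h3
      rw [scanB_other disp inl c t hc1 hc2]
      rw [repl_cons_ne _ _ hc2]
      rw [scan2_ne _ _ _ (by rintro ⟨hh, _⟩; exact hc1 hh)]
      rw [scan1_ne _ _ _ hc1]
      rw [ih]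
  | case5 => simp [scanB, repl, scan2, scan1]

theorem bGo_one (disp inl : Bool) (t : List Char) (out : List (List Char)) (h : t.head? ≠ some '$') :
    bGo disp inl ('$' :: t) out = bGo disp (!inl) t (out ++ [if inl then ['\\','\\','('] else ['\\','\\',')']]) := by
  rw [bGo.eq_def]; split
  case _ => simp_all
  case _ => simp_all
  case _ => simp_all
  case _ h1 h2 heq => injection heq with e1 e2; exact absurd e1.symm h1
  case _ => simp_all

theorem bGo_other (disp inl : Bool) (c : Char) (t : List Char) (out : List (List Char))
    (h1 : c ≠ '$') (h2 : c ≠ '_') :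
    bGo disp inl (c :: t) out = bGo disp inl t (out ++ [[c]]) := by
  rw [bGo.eq_def]; split <;> simp_all

theorem bGo_join (disp inl : Bool) (l : List Char) (out : List (List Char)) :
    (bGo disp inl l out).flatten = out.flatten ++ scanB disp inl l := by
  induction disp, inl, l using scanB.induct generalizing out with
  | case1 disp inl t ih =>
      rw [bGo, scanB, ih]
      simp
  | case2 disp inl t hne ih =>
      have ht : t.head? ≠ some '$' := by
        intro hh
        cases t with
        | nil => simp at hh
        | cons d r => simp at hh; exact hne r (by rw [hh])
      rw [bGo_one disp inl t out ht, scanB_one disp inl t ht, ih]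
      simp
  | case3 disp inl t ih =>
      rw [bGo, scanB, ih]
      simp
  | case4 disp inl c t h1 h2 h3 ih =>
      rw [bGo_other disp inl c t out h2 h3, scanB_other disp inl c t h2 h3, ih]
      simp
  | case5 x y => simp [bGo, scanB]


theorem join_nil_flatten (ps : List (List Char)) : PySem.Chars.join [] ps = ps.flatten := by
  rw [PySem.Chars.join]
  induction ps with
  | nil => rfl
  | cons h t ih =>
    cases t with
    | nil => simp [List.intercalate]
    | cons y r =>
      simp only [List.intercalate, List.intersperse] at *
      simp_all [List.flatten]

theorem pvDict_dd : (fun p => PySem.Dict.getD pvDictA (p, ['$','$']) [])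
    = (fun p => if p then ['\\','\\','['] else ['\\','\\',']']) := by
  funext p; cases p <;> rfl

theorem pvDict_d : (fun p => PySem.Dict.getD pvDictA (p, ['$']) [])
    = (fun p => if p then ['\\','\\','('] else ['\\','\\',')']) := by
  funext p; cases p <;> rfl

theorem pass_dd (cs : List Char) :
    PySem.Chars.join []
      (((PySem.List.pyRange 0 (((PySem.Chars.splitOn cs ['$','$']).length : Int) - 1) 1).foldl
        (fun (st : List (List Char) × Bool) i =>
          (st.1.set i.toNat (PySem.List.pyGetD st.1 i [] ++ PySem.Dict.getD pvDictA (st.2, ['$','$']) []), !st.2))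
        (PySem.Chars.splitOn cs ['$','$'], true))).1 = scan2 true cs := by
  rw [splitOn2_eq]
  have h := fold_addSeps (fun p => PySem.Dict.getD pvDictA (p, ['$','$']) []) [] (splits2 cs) true
  simp only [List.length_nil, Nat.cast_zero, List.nil_append, zero_add] at h
  rw [h, pvDict_dd, join_nil_flatten, flatten_addSeps2]

theorem pass_d (cs : List Char) :
    PySem.Chars.join []
      (((PySem.List.pyRange 0 (((PySem.Chars.splitOn cs ['$']).length : Int) - 1) 1).foldl
        (fun (st : List (List Char) × Bool) i =>
          (st.1.set i.toNat (PySem.List.pyGetD st.1 i [] ++ PySem.Dict.getD pvDictA (st.2, ['$']) []), !st.2))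
        (PySem.Chars.splitOn cs ['$'], true))).1 = scan1 true cs := by
  rw [splitOn1_eq]
  have h := fold_addSeps (fun p => PySem.Dict.getD pvDictA (p, ['$']) []) [] (splits1 cs) true
  simp only [List.length_nil, Nat.cast_zero, List.nil_append, zero_add] at h
  rw [h, pvDict_d, join_nil_flatten, flatten_addSeps1]

-- ===== VERDICT (by name: the statement is the Claim_ definition above) =====
theorem replace_dollars_underlines_spec : Claim_equal_replace_dollars_underlines := by
  intro old _
  unfold Spec_replace_dollars_underlines replace_dollars_underlines replace_dollars_underlines_alt
  simp only [List.foldl_cons, List.foldl_nil]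
  rw [replace_eq_repl]
  rw [pass_dd, pass_d]
  rw [join_nil_flatten, bGo_join, scanB_compose]
  simp
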